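-- pv_equiv track=rewrite | github.com/MAHNOOR80/HUMANOID_ROBOTICS_AI_TEXTBOOK_ | agent.py | _is_greeting_or_low_intent
-- ===== SOURCE A (Python) =====
-- def _is_greeting_or_low_intent(query: str) -> bool:
--     # (This method remains unchanged from your original code)
--     if not query: return True
--     normalized_query = query.lower().strip()
--     greeting_patterns = [
--         'hello', 'hi', 'hey', 'greetings', 'good morning', 'how are you',
--         'who are you', 'what can you do', 'thanks', 'bye', 'help'
--     ]
--
--     for pattern in greeting_patterns:
--         if normalized_query == pattern: return True
--         if normalized_query.startswith(pattern + ' '): return True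
--
--     if len(normalized_query.strip()) < 3 and not any(c.isalpha() for c in normalized_query):
--         return True
--     return False
-- ===== SOURCE B (Python) =====
-- _PATTERNS = frozenset([
--     'hello', 'hi', 'hey', 'greetings', 'good morning', 'how are you',
--     'who are you', 'what can you do', 'thanks', 'bye', 'help'
-- ])
--
-- def _is_greeting_or_low_intent(query: str) -> bool:
--     # One left-to-right scan of the normalized query, testing the prefix
--     # accumulated so far against a pattern set at each space boundary;
--     # the whole-string test and the low-intent length guard form the
--     # post-loop result.  (The inner .strip() of A is dropped: the string
--     # is already stripped, so it is the identity.)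
--     if not query:
--         return True
--     nq = query.lower().strip()
--     pref = ''
--     for c in nq:
--         if c == ' ' and pref in _PATTERNS:
--             return True
--         pref += c
--     return pref in _PATTERNS or (len(pref) < 3 and not any(ch.isalpha() for ch in pref))
-- ===== Notes on version B (the rewrite author's own statement) =====
-- stated objective: alternative
-- what changed: Instead of looping over the 11 greeting patterns and testing equality/startswith for each, B makes a single left-to-right scan of the normalized query with a growing prefix accumulator, testing the accumulated prefix for membership in a frozenset at each space boundary and once after the loop; the redundant inner .strip() in the final length guard is dropped since the string is already stripped.
import Mathlib
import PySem

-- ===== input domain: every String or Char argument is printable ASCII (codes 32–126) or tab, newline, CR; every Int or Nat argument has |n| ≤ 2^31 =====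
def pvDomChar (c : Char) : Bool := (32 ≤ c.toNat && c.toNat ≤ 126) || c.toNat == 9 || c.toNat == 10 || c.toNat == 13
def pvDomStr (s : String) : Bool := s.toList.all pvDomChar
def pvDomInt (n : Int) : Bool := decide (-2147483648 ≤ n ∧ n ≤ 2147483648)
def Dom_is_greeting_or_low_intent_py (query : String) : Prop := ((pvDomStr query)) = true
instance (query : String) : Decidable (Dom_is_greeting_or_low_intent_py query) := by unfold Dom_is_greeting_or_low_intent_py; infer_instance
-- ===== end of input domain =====

-- ===== PORT A =====
-- B replaces A's loop over the 11 patterns by a single left-to-right scan with a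
-- prefix accumulator, testing the accumulated prefix against a pattern set at each
-- space boundary and once after the loop (alternative decomposition, same cost).
def pvGreetingPatterns : List String :=
  ["hello", "hi", "hey", "greetings", "good morning", "how are you",
   "who are you", "what can you do", "thanks", "bye", "help"]

def is_greeting_or_low_intent_py (query : String) : Bool :=
  if query == "" then true
  else
    let nq := PySem.Str.strip (PySem.Str.lower query)
    -- for pattern in greeting_patterns: early "return True" collapses to List.any
    if pvGreetingPatterns.any (fun p => nq == p || PySem.Str.startswith nq (p ++ " ")) then true
    else if PySem.Str.len (PySem.Str.strip nq) < 3 && !(nq.toList.any PySem.Chars.isalpha) then true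
    else false

-- ===== PORT B =====
def pvGreetingSet : PySem.Set (List Char) :=
  PySem.Set.ofList
    ["hello".toList, "hi".toList, "hey".toList, "greetings".toList, "good morning".toList,
     "how are you".toList, "who are you".toList, "what can you do".toList,
     "thanks".toList, "bye".toList, "help".toList]

-- the `for c in nq:` loop of Source B: `pref` is the accumulated prefix, an early
-- `return True` at a space boundary whose prefix is a pattern, and the
-- post-loop return as the base case
def pvScan : List Char → List Char → Bool
  | [], pref =>
      pvGreetingSet.contains pref ||
        (decide (pref.length < 3) && !(pref.any PySem.Chars.isalpha))
  | c :: rest, pref =>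
      if c == ' ' && pvGreetingSet.contains pref then true
      else pvScan rest (pref ++ [c])

def is_greeting_or_low_intent_py_alt (query : String) : Bool :=
  if query == "" then true
  else
    let nq := PySem.Str.strip (PySem.Str.lower query)
    pvScan nq.toList []

-- ===== PRECONDITION & SPEC =====
def Spec_is_greeting_or_low_intent_py (query : String) (out : Bool) : Prop := out = is_greeting_or_low_intent_py_alt query
instance (query : String) (out : Bool) : Decidable (Spec_is_greeting_or_low_intent_py query out) := by unfold Spec_is_greeting_or_low_intent_py; infer_instance

-- ===== CLAIM (what is proved, stated in full; the proofs are below) =====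
def Claim_equal_is_greeting_or_low_intent_py : Prop := ∀ (query : String), Dom_is_greeting_or_low_intent_py query → Spec_is_greeting_or_low_intent_py query (is_greeting_or_low_intent_py query)

-- ===== LEMMAS AND PROOFS =====

-- strip is idempotent, so A's inner `normalized_query.strip()` is `nq` itself.
lemma pv_strip_idem (l : List Char) :
    PySem.Chars.strip (PySem.Chars.strip l) = PySem.Chars.strip l := by
  set p := PySem.Chars.isspace with hp
  have key : ∀ w z : List Char, z <+: List.dropWhile p w → List.dropWhile p z = z := by
    intro w z hz
    cases hz' : z with
    | nil => simp
    | cons c t =>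
      rw [List.dropWhile_cons]
      subst hz'
      obtain ⟨r, hr⟩ := hz
      have hc : p c = false := by
        have := List.head_dropWhile_not p (l := w)
        rw [← hr] at this
        simpa using this
      simp [hc]
  simp only [PySem.Chars.strip, PySem.Chars.rstrip, PySem.Chars.lstrip]
  have h1 : List.dropWhile p (List.dropWhile p ((List.dropWhile p l).reverse)).reverse
      = (List.dropWhile p ((List.dropWhile p l).reverse)).reverse := by
    apply key l
    have hs : List.dropWhile p ((List.dropWhile p l).reverse) <:+ (List.dropWhile p l).reverse :=
      List.dropWhile_suffix p
    simpa using hs.reverse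
  rw [h1, List.reverse_reverse, List.dropWhile_idempotent]

lemma pv_str_strip_idem (s : String) :
    PySem.Str.strip (PySem.Str.strip s) = PySem.Str.strip s := by
  apply String.toList_inj.mp
  rw [PySem.Str.toList_strip, PySem.Str.toList_strip, pv_strip_idem]

-- what the scan computes: a space boundary whose prefix is a pattern,
-- or the whole string is a pattern, or the low-intent guard on the whole string
lemma pv_scan_iff : ∀ (rest pref : List Char),
    pvScan rest pref = true ↔
      ((∃ i, ∃ _ : i < rest.length, rest[i] = ' ' ∧ pvGreetingSet.contains (pref ++ rest.take i) = true) ∨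
        pvGreetingSet.contains (pref ++ rest) = true ∨
        ((pref ++ rest).length < 3 ∧ (pref ++ rest).any PySem.Chars.isalpha = false)) := by
  intro rest
  induction rest with
  | nil =>
    intro pref
    simp [pvScan, Bool.and_eq_true]
  | cons c rest ih =>
    intro pref
    simp only [pvScan]
    split_ifs with h
    · simp only [Bool.and_eq_true, beq_iff_eq] at h
      simp only [true_iff]
      left
      exact ⟨0, by simp, by simpa using h.1, by simpa using h.2⟩
    · rw [ih (pref ++ [c])]
      constructor
      · rintro (⟨i, hi, hsp, hm⟩ | hm | hlow)
        · exact Or.inl ⟨i + 1, by simpa using hi, by simpa using hsp, by simpa using hm⟩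
        · exact Or.inr (Or.inl (by simpa using hm))
        · exact Or.inr (Or.inr (by simpa using hlow))
      · rintro (⟨i, hi, hsp, hm⟩ | hm | hlow)
        · cases i with
          | zero =>
            exfalso
            apply h
            simp only [Bool.and_eq_true, beq_iff_eq]
            exact ⟨by simpa using hsp, by simpa using hm⟩
          | succ j =>
            exact Or.inl ⟨j, by simpa using hi, by simpa using hsp, by simpa using hm⟩
        · exact Or.inr (Or.inl (by simpa using hm))
        · exact Or.inr (Or.inr (by simpa using hlow))

-- A's per-pattern loop hits exactly when the whole string or a space-boundary
-- prefix is a pattern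
lemma pv_hit_iff (nq : String) :
    (pvGreetingPatterns.any fun p => nq == p || PySem.Str.startswith nq (p ++ " ")) = true ↔
      ((∃ i, ∃ _ : i < nq.toList.length, nq.toList[i] = ' ' ∧
          pvGreetingSet.contains (([] : List Char) ++ nq.toList.take i) = true) ∨
        pvGreetingSet.contains (([] : List Char) ++ nq.toList) = true) := by
  have hset : pvGreetingSet = PySem.Set.ofList (pvGreetingPatterns.map String.toList) := rfl
  have hmem : ∀ l : List Char, pvGreetingSet.contains l = true ↔
      ∃ p ∈ pvGreetingPatterns, p.toList = l := by
    intro l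
    rw [hset, PySem.Set.contains_eq_listContains, List.contains_iff_mem,
      PySem.Set.mem_ofList, List.mem_map]
  simp only [List.nil_append, List.any_eq_true, Bool.or_eq_true, beq_iff_eq,
    PySem.Str.startswith_eq, PySem.Chars.startswith_iff]
  constructor
  · rintro ⟨p, hp, h | h⟩
    · exact Or.inr ((hmem _).mpr ⟨p, hp, by rw [h]⟩)
    · left
      rw [show (p ++ " ").toList = p.toList ++ [' '] by simp] at h
      obtain ⟨t, ht⟩ := h
      refine ⟨p.toList.length, by rw [← ht]; simp, ?_, ?_⟩
      · simp [← ht]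
      · rw [show nq.toList.take p.toList.length = p.toList by rw [← ht]; simp]
        exact (hmem _).mpr ⟨p, hp, rfl⟩
  · rintro (⟨i, hi, hsp, hm⟩ | hm)
    · obtain ⟨p, hp, hpl⟩ := (hmem _).mp hm
      refine ⟨p, hp, Or.inr ?_⟩
      rw [show (p ++ " ").toList = p.toList ++ [' '] by simp, hpl,
        ← hsp, ← List.take_succ_eq_append_getElem hi]
      exact List.take_prefix _ _
    · obtain ⟨p, hp, hpl⟩ := (hmem _).mp hm
      exact ⟨p, hp, Or.inl (String.toList_inj.mp hpl.symm)⟩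

-- ===== VERDICT (by name: the statement is the Claim_ definition above) =====
theorem is_greeting_or_low_intent_py_spec : Claim_equal_is_greeting_or_low_intent_py := by
  intro query _
  unfold Spec_is_greeting_or_low_intent_py is_greeting_or_low_intent_py is_greeting_or_low_intent_py_alt
  cases hq : (query == "") with
  | true => simp
  | false =>
    simp only [Bool.false_eq_true, if_false]
    set nq := PySem.Str.strip (PySem.Str.lower query) with hnq
    rw [hnq, pv_str_strip_idem, ← hnq]
    rw [Bool.eq_iff_iff]
    rw [pv_scan_iff nq.toList []]
    constructor
    · intro h
      split_ifs at h with h1 h2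
      · rcases (pv_hit_iff nq).mp h1 with hb | hw
        · exact Or.inl hb
        · exact Or.inr (Or.inl hw)
      · obtain ⟨ha, hb⟩ := (Bool.and_eq_true _ _).mp h2
        refine Or.inr (Or.inr ⟨?_, ?_⟩)
        · have hlt := of_decide_eq_true ha
          rw [PySem.Str.len_eq] at hlt
          rw [List.nil_append]
          omega
        · rw [List.nil_append]
          exact (Bool.not_eq_true' _).mp hb
    · intro h
      split_ifs with h1 h2
      · rfl
      · rfl
      · exfalso
        rcases h with hb | hw | hlow
        · exact h1 ((pv_hit_iff nq).mpr (Or.inl hb))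
        · exact h1 ((pv_hit_iff nq).mpr (Or.inr hw))
        · apply h2
          rw [List.nil_append] at hlow
          refine (Bool.and_eq_true _ _).mpr ⟨?_, ?_⟩
          · exact decide_eq_true (by rw [PySem.Str.len_eq]; exact_mod_cast hlow.1)
          · exact (Bool.not_eq_true' _).mpr hlow.2
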